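-- pv_equiv track=rewrite | github.com/DewPeaceTigers/AlgorithmStudy | weeks/week_18/PG_86052/yeri.py | solution
-- ===== SOURCE A (Python) =====
-- def findCycle(dir,x,y,visits,grids):
--     dirs={
--         'S':[0,1,2,3],
--         'L':[1,2,3,0],
--         'R':[3,0,1,2]
--     }
--     dx = [+1, 0, -1, 0]
--     dy = [0, +1, 0, -1]
--     if visits[x][y][dir]: return 0
--     visits[x][y][dir]= True
--     i,j,d = x,y,dir
--     time=0
--     while True:
--         time+=1
--         nx = (i+dx[d])%len(grids)
--         ny = (j+dy[d])%len(grids[0])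
--         d = dirs[grids[nx][ny]][d]
--         if nx==x and ny==y and d==dir : break
--         i,j=nx,ny
--         visits[i][j][d]=True
--     return time
--
-- def solution(grids):
--     for i in range(len(grids)):
--         grids[i]=list(grids[i])
--     visits=[ [[False]*4 for j in range(len(grids[i]))] for i in range(len(grids)) ]
--     pathes=[]
--     for i in range(len(grids)):
--         for j in range(len(grids[i])):
--             for d in range(4):
--                 temp = findCycle(d,i,j,visits,grids)
--                 if temp!=0 : pathes.append(temp)
--     pathes.sort()
--     return pathes
-- ===== SOURCE B (Python) =====
-- # B: cycle-leader counting -- no visited bookkeeping: each state walks its orbit and a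
-- # cycle's length is appended only at the cycle's lexicographically smallest state (the
-- # walk aborts early as soon as a smaller state is met); turns are computed arithmetically
-- # as (d + t) % 4 instead of permutation tables.  Same return value and the same
-- # grids[i] = list(grids[i]) mutation as A.
-- def _step(grids, x, y, d):
--     turn = {'S': 0, 'L': 1, 'R': 3}
--     if d == 0:
--         x = (x + 1) % len(grids)
--     elif d == 1:
--         y = (y + 1) % len(grids[0])
--     elif d == 2:
--         x = (x - 1) % len(grids)
--     else:
--         y = (y - 1) % len(grids[0])
--     return (x, y, (d + turn[grids[x][y]]) % 4)
--
-- def solution(grids):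
--     for i in range(len(grids)):
--         grids[i] = list(grids[i])
--     lengths = []
--     for x in range(len(grids)):
--         for y in range(len(grids[x])):
--             for d in range(4):
--                 cur, n = _step(grids, x, y, d), 1
--                 while cur > (x, y, d):
--                     cur = _step(grids, *cur)
--                     n += 1
--                 if cur == (x, y, d):
--                     lengths.append(n)
--     lengths.sort()
--     return lengths
-- ===== Notes on version B (the rewrite author's own statement) =====
-- stated objective: alternative
-- what changed: A's stateful first-visit scan (a mutable 3-D visits structure marked while following the beam) is replaced by stateless cycle-leader counting: every state walks its own orbit with arithmetic turns (d+t)%4, aborts as soon as a lexicographically smaller state appears, and a cycle's length is appended only at its minimal state, so no visited bookkeeping exists at all.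
import Mathlib
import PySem

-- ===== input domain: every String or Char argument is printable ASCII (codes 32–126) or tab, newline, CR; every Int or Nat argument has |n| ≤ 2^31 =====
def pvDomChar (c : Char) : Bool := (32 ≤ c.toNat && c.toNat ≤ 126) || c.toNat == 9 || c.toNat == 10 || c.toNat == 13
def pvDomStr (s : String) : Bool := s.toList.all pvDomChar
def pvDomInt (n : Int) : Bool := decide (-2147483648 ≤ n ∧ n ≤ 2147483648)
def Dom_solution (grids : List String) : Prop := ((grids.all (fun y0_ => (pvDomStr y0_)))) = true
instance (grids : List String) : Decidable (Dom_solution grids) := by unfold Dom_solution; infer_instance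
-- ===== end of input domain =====

-- B replaces A's stateful first-visit scan by stateless cycle-leader counting (a cycle's
-- length is appended only at its lexicographically minimal state, with arithmetic turns);
-- return values agree (both Pythons perform the same grids[i]=list(grids[i]) mutation,
-- the equivalence proved here is about the return value).

-- ===== PORT A =====
-- the dirs / dx / dy tables of findCycle
def pvDirsA : PySem.Dict Char (List Int) := PySem.Dict.ofList [('S', [0,1,2,3]), ('L', [1,2,3,0]), ('R', [3,0,1,2])]
def pvDxA : List Int := [1, 0, -1, 0]
def pvDyA : List Int := [0, 1, 0, -1]

-- visits[x][y][d] read / assignment (indices reached under Pre_ are in range, so getD/set are exact)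
def pvVGet (v : List (List (List Bool))) (x y d : Int) : Bool :=
  ((v.getD x.toNat []).getD y.toNat []).getD d.toNat false
def pvVSet (v : List (List (List Bool))) (x y d : Int) : List (List (List Bool)) :=
  v.set x.toNat ((v.getD x.toNat []).set y.toNat
    (((v.getD x.toNat []).getD y.toNat []).set d.toNat true))

-- the 'while True' loop of findCycle; the fuel only makes it total (never exhausted under Pre_)
def pvFindLoop (gs : List (List Char)) (x y dir : Int) :
    Nat → Int → Int → Int → Int → List (List (List Bool)) → Int × List (List (List Bool))
  | 0, _, _, _, time, v => (time, v)
  | fuel+1, i, j, d, time, v =>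
    let time' := time + 1
    let nx := PySem.Int.mod (i + pvDxA.getD d.toNat 0) (gs.length : Int)
    let ny := PySem.Int.mod (j + pvDyA.getD d.toNat 0) ((gs.headD []).length : Int)
    let d' := ((PySem.Dict.get? pvDirsA ((gs.getD nx.toNat []).getD ny.toNat ' ')).getD []).getD d.toNat 0
    if nx = x ∧ ny = y ∧ d' = dir then (time', v)
    else pvFindLoop gs x y dir fuel nx ny d' time' (pvVSet v nx ny d')

def pvFindCycle (gs : List (List Char)) (dir x y : Int) (v : List (List (List Bool))) :
    Int × List (List (List Bool)) :=
  if pvVGet v x y dir then (0, v)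
  else pvFindLoop gs x y dir (gs.length * (gs.headD []).length * 4 + 1) x y dir 0
    (pvVSet v x y dir)

def solution (grids : List String) : List Int :=
  let gs := grids.map String.toList
  let visits0 := gs.map (fun row => row.map (fun _ => [false, false, false, false]))
  let res := (List.range gs.length).foldl (fun acc (i : Nat) =>
      (List.range ((gs.getD i []).length)).foldl (fun acc (j : Nat) =>
        (List.range 4).foldl (fun (acc : List Int × List (List (List Bool))) (d : Nat) =>
          let r := pvFindCycle gs (d : Int) (i : Int) (j : Int) acc.2
          (if r.1 ≠ 0 then acc.1 ++ [r.1] else acc.1, r.2)) acc) acc)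
      (([] : List Int), visits0)
  PySem.List.sorted res.1 (fun x => x) false

-- ===== PORT B =====
-- the turn table of _step
def pvTurnB : PySem.Dict Char Int := PySem.Dict.ofList [('S', 0), ('L', 1), ('R', 3)]

-- _step: the if/elif movement chain, then the arithmetic turn (d + turn[..]) % 4
def pvStepB (gs : List (List Char)) (s : Int × Int × Int) : Int × Int × Int :=
  let xy :=
    if s.2.2 = 0 then (PySem.Int.mod (s.1 + 1) (gs.length : Int), s.2.1)
    else if s.2.2 = 1 then (s.1, PySem.Int.mod (s.2.1 + 1) ((gs.headD []).length : Int))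
    else if s.2.2 = 2 then (PySem.Int.mod (s.1 - 1) (gs.length : Int), s.2.1)
    else (s.1, PySem.Int.mod (s.2.1 - 1) ((gs.headD []).length : Int))
  (xy.1, xy.2,
    PySem.Int.mod (s.2.2 + (PySem.Dict.get? pvTurnB ((gs.getD xy.1.toNat []).getD xy.2.toNat ' ')).getD 0) 4)

-- Python tuple comparison cur > (x, y, d): lexicographic on the triple
def pvLexGt (a b : Int × Int × Int) : Bool :=
  decide (b.1 < a.1) || (decide (a.1 = b.1) &&
    (decide (b.2.1 < a.2.1) || (decide (a.2.1 = b.2.1) && decide (b.2.2 < a.2.2))))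

-- the 'while cur > (x, y, d)' loop; the fuel only makes it total (never exhausted under Pre_)
def pvWalkAlt (gs : List (List Char)) (s0 : Int × Int × Int) :
    Nat → (Int × Int × Int) → Int → Int × (Int × Int × Int)
  | 0, cur, n => (n, cur)
  | fuel+1, cur, n =>
    if pvLexGt cur s0 then pvWalkAlt gs s0 fuel (pvStepB gs cur) (n + 1) else (n, cur)

def solution_alt (grids : List String) : List Int :=
  let gs := grids.map String.toList
  let res := (List.range gs.length).foldl (fun acc (x : Nat) =>
      (List.range ((gs.getD x []).length)).foldl (fun acc (y : Nat) =>
        (List.range 4).foldl (fun (acc : List Int) (d : Nat) =>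
          let s := ((x : Int), (y : Int), (d : Int))
          let r := pvWalkAlt gs s (gs.length * (gs.headD []).length * 4 + 1) (pvStepB gs s) 1
          if r.2 = s then acc ++ [r.1] else acc) acc) acc)
      ([] : List Int)
  PySem.List.sorted res (fun x => x) false

-- ===== PRECONDITION & SPEC =====
-- Pre_ excludes only inputs on which A does not return: a non-'S'/'L'/'R' character (KeyError),
-- rows of unequal length (IndexError or divergence), or a length-zero first row next to a longer
-- row (ZeroDivisionError).  Admitted: grids whose rows all have length zero, and grids with
-- equal-length nonzero rows of 'S'/'L'/'R' characters.
def Pre_solution (grids : List String) : Prop :=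
  (grids.all (fun s => s.toList.length == 0)) = true ∨
  (0 < (grids.headD "").toList.length ∧
    (grids.all (fun s => s.toList.length == (grids.headD "").toList.length
      && s.toList.all (fun c => c == 'S' || c == 'L' || c == 'R'))) = true)
instance (grids : List String) : Decidable (Pre_solution grids) := by
  unfold Pre_solution; infer_instance
def pvWitness_solution : List String := ["SL", "RS"]

def Spec_solution (grids : List String) (out : List Int) : Prop := out = solution_alt grids
instance (grids : List String) (out : List Int) : Decidable (Spec_solution grids out) := by
  unfold Spec_solution; infer_instance

-- ===== CLAIM (what is proved, stated in full; the proofs are below) =====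
def Claim_equal_solution : Prop :=
  ∀ (grids : List String), Dom_solution grids → Pre_solution grids →
    Spec_solution grids (solution grids)


-- ===== LEMMAS AND PROOFS =====

-- proof-side view of one step of A's walk (exactly the let-expressions of pvFindLoop)
def pvStep (gs : List (List Char)) (s : Int × Int × Int) : Int × Int × Int :=
  let nx := PySem.Int.mod (s.1 + pvDxA.getD s.2.2.toNat 0) (gs.length : Int)
  let ny := PySem.Int.mod (s.2.1 + pvDyA.getD s.2.2.toNat 0) ((gs.headD []).length : Int)
  let d' := ((PySem.Dict.get? pvDirsA ((gs.getD nx.toNat []).getD ny.toNat ' ')).getD []).getD s.2.2.toNat 0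
  (nx, ny, d')

def pvValid (R C : Nat) (s : Int × Int × Int) : Prop :=
  0 ≤ s.1 ∧ s.1 < R ∧ 0 ≤ s.2.1 ∧ s.2.1 < C ∧ 0 ≤ s.2.2 ∧ s.2.2 < 4

def pvEnc (C : Nat) (s : Int × Int × Int) : Int := (s.1 * C + s.2.1) * 4 + s.2.2

def pvGridOK (gs : List (List Char)) (R C : Nat) : Prop :=
  gs.length = R ∧ 0 < R ∧ 0 < C ∧ (gs.headD []).length = C ∧
  ∀ row ∈ gs, row.length = C ∧ ∀ c ∈ row, c = 'S' ∨ c = 'L' ∨ c = 'R'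

theorem pvRotA_bounds (c : Char) (hc : c = 'S' ∨ c = 'L' ∨ c = 'R') (k : Nat) (hk : k < 4) :
    0 ≤ ((PySem.Dict.get? pvDirsA c).getD []).getD k 0 ∧
      ((PySem.Dict.get? pvDirsA c).getD []).getD k 0 < 4 := by
  rcases hc with rfl | rfl | rfl <;> interval_cases k <;> decide

theorem pvRotA_inj (c : Char) (hc : c = 'S' ∨ c = 'L' ∨ c = 'R') (k1 k2 : Nat)
    (h1 : k1 < 4) (h2 : k2 < 4)
    (h : ((PySem.Dict.get? pvDirsA c).getD []).getD k1 0
        = ((PySem.Dict.get? pvDirsA c).getD []).getD k2 0) : k1 = k2 := by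
  rcases hc with rfl | rfl | rfl <;> interval_cases k1 <;> interval_cases k2 <;> revert h <;> decide

theorem pvMod_bounds (a b : Int) (hb : 0 < b) :
    0 ≤ PySem.Int.mod a b ∧ PySem.Int.mod a b < b := by
  rw [PySem.Int.mod_eq_emod_of_pos hb]
  exact ⟨Int.emod_nonneg _ (ne_of_gt hb), Int.emod_lt_of_pos _ hb⟩

theorem pvMod_cancel {a b t n : Int} (hn : 0 < n) (h0a : 0 ≤ a) (ha : a < n)
    (h0b : 0 ≤ b) (hb : b < n)
    (h : PySem.Int.mod (a + t) n = PySem.Int.mod (b + t) n) : a = b := by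
  rw [PySem.Int.mod_eq_emod_of_pos hn, PySem.Int.mod_eq_emod_of_pos hn] at h
  have hz := Int.emod_eq_emod_iff_emod_sub_eq_zero.mp h
  have hdvd : n ∣ (a + t - (b + t)) := Int.dvd_of_emod_eq_zero hz
  have hm : a + t - (b + t) = a - b := by ring
  rw [hm] at hdvd
  have := Int.eq_zero_of_abs_lt_dvd hdvd (by rw [abs_lt]; omega)
  omega

theorem pvCell_mem {gs : List (List Char)} {R C : Nat} (h : pvGridOK gs R C)
    {nx ny : Int} (hx0 : 0 ≤ nx) (hx : nx < R) (hy0 : 0 ≤ ny) (hy : ny < C) :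
    (gs.getD nx.toNat []).getD ny.toNat ' ' = 'S' ∨
    (gs.getD nx.toNat []).getD ny.toNat ' ' = 'L' ∨
    (gs.getD nx.toNat []).getD ny.toNat ' ' = 'R' := by
  obtain ⟨hlen, hR, hC, hhead, hrows⟩ := h
  have hxl : nx.toNat < gs.length := by rw [hlen]; omega
  have hrow : gs.getD nx.toNat [] ∈ gs := by
    rw [List.getD_eq_getElem _ _ hxl]; exact List.getElem_mem hxl
  obtain ⟨hrl, hchars⟩ := hrows _ hrow
  have hyl : ny.toNat < (gs.getD nx.toNat []).length := by rw [hrl]; omega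
  have hcell : (gs.getD nx.toNat []).getD ny.toNat ' ' ∈ gs.getD nx.toNat [] := by
    rw [List.getD_eq_getElem _ _ hyl]; exact List.getElem_mem hyl
  exact hchars _ hcell

theorem pvStep_valid {gs : List (List Char)} {R C : Nat} (h : pvGridOK gs R C)
    {s : Int × Int × Int} (hs : pvValid R C s) : pvValid R C (pvStep gs s) := by
  obtain ⟨hlen, hR, hC, hhead, hrows⟩ := h
  obtain ⟨h1, h2, h3, h4, h5, h6⟩ := hs
  have hbR : (0 : Int) < (gs.length : Int) := by rw [hlen]; exact_mod_cast hR
  have hbC : (0 : Int) < ((gs.headD []).length : Int) := by rw [hhead]; exact_mod_cast hC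
  have hx := pvMod_bounds (s.1 + pvDxA.getD s.2.2.toNat 0) _ hbR
  have hy := pvMod_bounds (s.2.1 + pvDyA.getD s.2.2.toNat 0) _ hbC
  have hcell := pvCell_mem (nx := PySem.Int.mod (s.1 + pvDxA.getD s.2.2.toNat 0) (gs.length : Int))
    (ny := PySem.Int.mod (s.2.1 + pvDyA.getD s.2.2.toNat 0) ((gs.headD []).length : Int))
    ⟨hlen, hR, hC, hhead, hrows⟩ hx.1 (by rw [← hlen]; exact hx.2) hy.1 (by rw [← hhead]; exact hy.2)
  have hd := pvRotA_bounds _ hcell s.2.2.toNat (by omega)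
  exact ⟨hx.1, by rw [← hlen]; exact hx.2, hy.1, by rw [← hhead]; exact hy.2, hd.1, hd.2⟩

theorem pvEnc_nonneg {R C : Nat} {s : Int × Int × Int} (hs : pvValid R C s) :
    0 ≤ pvEnc C s := by
  obtain ⟨h1, h2, h3, h4, h5, h6⟩ := hs
  have : 0 ≤ s.1 * (C : Int) := mul_nonneg h1 (by positivity)
  unfold pvEnc; omega

theorem pvEnc_lt {R C : Nat} {s : Int × Int × Int} (hs : pvValid R C s) :
    pvEnc C s < ((R * C * 4 : Nat) : Int) := by
  obtain ⟨h1, h2, h3, h4, h5, h6⟩ := hs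
  unfold pvEnc; push_cast; nlinarith

theorem pvEnc_inj {R C : Nat} {s1 s2 : Int × Int × Int} (h1 : pvValid R C s1)
    (h2 : pvValid R C s2) (h : pvEnc C s1 = pvEnc C s2) : s1 = s2 := by
  obtain ⟨x1, y1, d1⟩ := s1
  obtain ⟨x2, y2, d2⟩ := s2
  obtain ⟨a1, b1, c1, e1, f1, g1⟩ := h1
  obtain ⟨a2, b2, c2, e2, f2, g2⟩ := h2
  simp only [pvEnc] at h
  simp only at a1 b1 c1 e1 f1 g1 a2 b2 c2 e2 f2 g2
  have hmid : x1 * (C : Int) + y1 = x2 * (C : Int) + y2 ∧ d1 = d2 := by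
    set A1 := x1 * (C : Int) + y1 with hA1
    set A2 := x2 * (C : Int) + y2 with hA2
    constructor <;> omega
  have hx : x1 = x2 := by
    rcases lt_trichotomy x1 x2 with hlt | heq | hgt
    · nlinarith [hmid.1]
    · exact heq
    · nlinarith [hmid.1]
  have hy : y1 = y2 := by have := hmid.1; rw [hx] at this; linarith
  simp [hx, hy, hmid.2]

theorem pvEnc_toNat_inj {R C : Nat} {s1 s2 : Int × Int × Int} (h1 : pvValid R C s1)
    (h2 : pvValid R C s2) (h : (pvEnc C s1).toNat = (pvEnc C s2).toNat) : s1 = s2 := by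
  have n1 := pvEnc_nonneg (R := R) h1
  have n2 := pvEnc_nonneg (R := R) h2
  exact pvEnc_inj h1 h2 (by omega)

theorem pvStep_inj {gs : List (List Char)} {R C : Nat} (h : pvGridOK gs R C)
    {s1 s2 : Int × Int × Int} (h1 : pvValid R C s1) (h2 : pvValid R C s2)
    (he : pvStep gs s1 = pvStep gs s2) : s1 = s2 := by
  obtain ⟨hlen, hR, hC, hhead, hrows⟩ := h
  obtain ⟨x1, y1, d1⟩ := s1
  obtain ⟨x2, y2, d2⟩ := s2
  obtain ⟨a1, b1, c1, e1, f1, g1⟩ := h1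
  obtain ⟨a2, b2, c2, e2, f2, g2⟩ := h2
  simp only at a1 b1 c1 e1 f1 g1 a2 b2 c2 e2 f2 g2
  simp only [pvStep, Prod.mk.injEq] at he
  obtain ⟨hnx, hny, hnd⟩ := he
  have hbR : (0 : Int) < (gs.length : Int) := by rw [hlen]; exact_mod_cast hR
  have hbC : (0 : Int) < ((gs.headD []).length : Int) := by rw [hhead]; exact_mod_cast hC
  have hx2 := pvMod_bounds (x2 + pvDxA.getD d2.toNat 0) _ hbR
  have hy2 := pvMod_bounds (y2 + pvDyA.getD d2.toNat 0) _ hbC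
  have hcell := pvCell_mem (nx := PySem.Int.mod (x2 + pvDxA.getD d2.toNat 0) (gs.length : Int))
    (ny := PySem.Int.mod (y2 + pvDyA.getD d2.toNat 0) ((gs.headD []).length : Int))
    ⟨hlen, hR, hC, hhead, hrows⟩ hx2.1 (by rw [← hlen]; exact hx2.2) hy2.1 (by rw [← hhead]; exact hy2.2)
  rw [hnx, hny] at hnd
  have hdn : d1.toNat = d2.toNat := pvRotA_inj _ hcell _ _ (by omega) (by omega) hnd
  have hd : d1 = d2 := by omega
  rw [hd] at hnx hny
  have hxeq : x1 = x2 := pvMod_cancel hbR a1 (by rw [hlen]; exact b1) a2 (by rw [hlen]; exact b2) hnx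
  have hyeq : y1 = y2 := pvMod_cancel hbC c1 (by rw [hhead]; exact e1) c2 (by rw [hhead]; exact e2) hny
  simp [hxeq, hyeq, hd]

theorem pvIter_valid {gs : List (List Char)} {R C : Nat} (h : pvGridOK gs R C)
    {s : Int × Int × Int} (hs : pvValid R C s) (k : Nat) :
    pvValid R C ((pvStep gs)^[k] s) := by
  induction k with
  | zero => exact hs
  | succ n ih => rw [Function.iterate_succ_apply']; exact pvStep_valid h ih

theorem pvIter_inj {gs : List (List Char)} {R C : Nat} (h : pvGridOK gs R C)
    (a : Nat) {t1 t2 : Int × Int × Int} (v1 : pvValid R C t1) (v2 : pvValid R C t2)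
    (he : (pvStep gs)^[a] t1 = (pvStep gs)^[a] t2) : t1 = t2 := by
  induction a with
  | zero => exact he
  | succ n ih =>
    rw [Function.iterate_succ_apply', Function.iterate_succ_apply'] at he
    exact ih (pvStep_inj h (pvIter_valid h v1 n) (pvIter_valid h v2 n) he)

theorem pvExists_return {gs : List (List Char)} {R C : Nat} (h : pvGridOK gs R C)
    {s : Int × Int × Int} (hs : pvValid R C s) :
    ∃ k, 1 ≤ k ∧ k ≤ R * C * 4 ∧ (pvStep gs)^[k] s = s := by
  have hval : ∀ k : Nat, pvValid R C ((pvStep gs)^[k] s) := pvIter_valid h hs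
  have hNpos : 0 < R * C * 4 := by
    obtain ⟨_, hR, hC, _, _⟩ := h
    exact Nat.mul_pos (Nat.mul_pos hR hC) (by norm_num)
  have hbound : ∀ k : Nat, (pvEnc C ((pvStep gs)^[k] s)).toNat < R * C * 4 := fun k => by
    have h1 := pvEnc_lt (hval k)
    have h2 := pvEnc_nonneg (hval k)
    omega
  have main : ∀ p q : Nat, p < q → q ≤ R * C * 4 → (pvStep gs)^[p] s = (pvStep gs)^[q] s →
      ∃ k, 1 ≤ k ∧ k ≤ R * C * 4 ∧ (pvStep gs)^[k] s = s := by
    intro p q hpq hqN he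
    have hq : q = p + (q - p) := by omega
    rw [hq, Function.iterate_add_apply] at he
    have hs2 := pvIter_inj h p hs (hval (q - p)) he
    exact ⟨q - p, by omega, by omega, hs2.symm⟩
  obtain ⟨a, b, hab, heq⟩ := Fintype.exists_ne_map_eq_of_card_lt
    (fun t : Fin (R * C * 4 + 1) =>
      (⟨(pvEnc C ((pvStep gs)^[t.1] s)).toNat, hbound t.1⟩ : Fin (R * C * 4)))
    (by simp)
  have hiter : (pvStep gs)^[a.1] s = (pvStep gs)^[b.1] s := by
    have hval' : ((pvEnc C ((pvStep gs)^[a.1] s)).toNat = (pvEnc C ((pvStep gs)^[b.1] s)).toNat) := by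
      simpa [Fin.mk.injEq] using heq
    exact pvEnc_toNat_inj (hval a.1) (hval b.1) hval'
  have hne : a.1 ≠ b.1 := fun hv => hab (Fin.ext hv)
  rcases Nat.lt_or_ge a.1 b.1 with hlt | hge
  · exact main a.1 b.1 hlt (by omega) hiter
  · exact main b.1 a.1 (by omega) (by omega) hiter.symm

-- the least period of a valid state
theorem pvPeriod_exists {gs : List (List Char)} {R C : Nat} (h : pvGridOK gs R C)
    {s : Int × Int × Int} (hs : pvValid R C s) :
    ∃ p, 1 ≤ p ∧ p ≤ R * C * 4 ∧ (pvStep gs)^[p] s = s ∧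
      (∀ k, 1 ≤ k → k < p → (pvStep gs)^[k] s ≠ s) := by
  obtain ⟨k0, hk1, hkN, hkret⟩ := pvExists_return h hs
  have hex : ∃ k, 1 ≤ k ∧ (pvStep gs)^[k] s = s := ⟨k0, hk1, hkret⟩
  classical
  let p := Nat.find hex
  have hp := Nat.find_spec hex
  refine ⟨p, hp.1, ?_, hp.2, ?_⟩
  · exact le_trans (Nat.find_min' hex ⟨hk1, hkret⟩) hkN
  · intro k hk1' hklt hkeq
    exact absurd ⟨hk1', hkeq⟩ (Nat.find_min hex hklt)

theorem pvIter_period {gs : List (List Char)} {s : Int × Int × Int} {p : Nat}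
    (hp : (pvStep gs)^[p] s = s) (a : Nat) :
    (pvStep gs)^[a] s = (pvStep gs)^[a % p] s := by
  conv_lhs => rw [show a = a % p + p * (a / p) from (Nat.mod_add_div a p).symm]
  rw [Function.iterate_add_apply, Function.iterate_mul, Function.iterate_fixed hp]

theorem pvOrb_symm {gs : List (List Char)} {R C : Nat} (h : pvGridOK gs R C)
    {w u : Int × Int × Int} (hw : pvValid R C w) {k : Nat}
    (hk : (pvStep gs)^[k] w = u) : ∃ m, (pvStep gs)^[m] u = w := by
  obtain ⟨q, hq1, _, hqret, _⟩ := pvPeriod_exists h hw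
  rcases Nat.eq_zero_or_pos k with rfl | hkpos
  · exact ⟨0, by simpa using hk.symm⟩
  · refine ⟨q * k - k, ?_⟩
    have hqk : (pvStep gs)^[q * k] w = w := by
      rw [Function.iterate_mul]; exact Function.iterate_fixed hqret k
    calc (pvStep gs)^[q * k - k] u = (pvStep gs)^[q * k - k] ((pvStep gs)^[k] w) := by rw [hk]
      _ = (pvStep gs)^[q * k - k + k] w := (Function.iterate_add_apply _ _ _ _).symm
      _ = (pvStep gs)^[q * k] w := by congr 1; have : k ≤ q * k := Nat.le_mul_of_pos_left k hq1; omega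
      _ = w := hqk

-- ----- the lexicographic order -----

theorem pvLexGt_irrefl (a : Int × Int × Int) : pvLexGt a a = false := by
  simp [pvLexGt]

theorem pvLexGt_asym {a b : Int × Int × Int} (h : pvLexGt a b = true) :
    pvLexGt b a = false := by
  obtain ⟨a1, a2, a3⟩ := a
  obtain ⟨b1, b2, b3⟩ := b
  simp only [pvLexGt, Bool.or_eq_true, Bool.and_eq_true, decide_eq_true_eq] at h
  simp only [pvLexGt, Bool.or_eq_false_iff, Bool.and_eq_false_iff, decide_eq_false_iff_not]
  omega
theorem pvLexGt_trichotomy (a b : Int × Int × Int) :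
    pvLexGt a b = true ∨ a = b ∨ pvLexGt b a = true := by
  obtain ⟨a1, a2, a3⟩ := a
  obtain ⟨b1, b2, b3⟩ := b
  simp only [pvLexGt, Bool.or_eq_true, Bool.and_eq_true, decide_eq_true_eq, Prod.mk.injEq]
  omega

-- ----- B's step agrees with A's step on valid states -----

theorem pvTurn_eq (c : Char) (hc : c = 'S' ∨ c = 'L' ∨ c = 'R') (d : Int)
    (h0 : 0 ≤ d) (h4 : d < 4) :
    PySem.Int.mod (d + (PySem.Dict.get? pvTurnB c).getD 0) 4
      = ((PySem.Dict.get? pvDirsA c).getD []).getD d.toNat 0 := by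
  rcases hc with rfl | rfl | rfl <;> interval_cases d <;> decide

theorem pvStepB_eq {gs : List (List Char)} {R C : Nat} (h : pvGridOK gs R C)
    {s : Int × Int × Int} (hs : pvValid R C s) : pvStepB gs s = pvStep gs s := by
  obtain ⟨hlen, hRp, hCp, hhead, hrows⟩ := h
  obtain ⟨x, y, d⟩ := s
  obtain ⟨h1, h2, h3, h4, h5, h6⟩ := hs
  simp only at h1 h2 h3 h4 h5 h6
  have hR0 : (0 : Int) < (gs.length : Int) := by rw [hlen]; exact_mod_cast hRp
  have hC0 : (0 : Int) < ((gs.headD []).length : Int) := by rw [hhead]; exact_mod_cast hCp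
  have hmodx : PySem.Int.mod x (gs.length : Int) = x := by
    rw [PySem.Int.mod_eq_emod_of_pos hR0]
    exact Int.emod_eq_of_lt h1 (by rw [hlen]; exact h2)
  have hmody : PySem.Int.mod y ((gs.headD []).length : Int) = y := by
    rw [PySem.Int.mod_eq_emod_of_pos hC0]
    exact Int.emod_eq_of_lt h3 (by rw [hhead]; exact h4)
  have hcellgen : ∀ nx ny : Int, 0 ≤ nx → nx < (gs.length : Int) → 0 ≤ ny →
      ny < ((gs.headD []).length : Int) →
      (gs.getD nx.toNat []).getD ny.toNat ' ' = 'S' ∨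
      (gs.getD nx.toNat []).getD ny.toNat ' ' = 'L' ∨
      (gs.getD nx.toNat []).getD ny.toNat ' ' = 'R' := by
    intro nx ny ha hb hc' hd'
    exact pvCell_mem ⟨hlen, hRp, hCp, hhead, hrows⟩ ha (by rw [← hlen]; exact hb)
      hc' (by rw [← hhead]; exact hd')
  have h2l : x < (gs.length : Int) := by rw [hlen]; exact h2
  have h4l : y < ((gs.headD []).length : Int) := by rw [hhead]; exact h4
  have hd : d = 0 ∨ d = 1 ∨ d = 2 ∨ d = 3 := by omega
  rcases hd with rfl | rfl | rfl | rfl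
  · -- d = 0
    have hb := pvMod_bounds (x + 1) _ hR0
    have hcell := hcellgen _ y hb.1 hb.2 h3 h4l
    have e1 : pvStep gs (x, y, 0) = (PySem.Int.mod (x + 1) (gs.length : Int), PySem.Int.mod (y + 0) ((gs.headD []).length : Int),
        ((PySem.Dict.get? pvDirsA ((gs.getD (PySem.Int.mod (x + 1) (gs.length : Int)).toNat []).getD
          (PySem.Int.mod (y + 0) ((gs.headD []).length : Int)).toNat ' ')).getD []).getD 0 0) := rfl
    rw [add_zero, hmody] at e1
    have e2 : pvStepB gs (x, y, 0) = (PySem.Int.mod (x + 1) (gs.length : Int), y,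
        PySem.Int.mod (0 + (PySem.Dict.get? pvTurnB ((gs.getD (PySem.Int.mod (x + 1) (gs.length : Int)).toNat []).getD
          (y).toNat ' ')).getD 0) 4) := rfl
    rw [e1, e2]
    simp only [Prod.mk.injEq]
    refine ⟨by trivial, by trivial, ?_⟩
    exact pvTurn_eq _ hcell 0 (by norm_num) (by norm_num)
  · -- d = 1
    have hb := pvMod_bounds (y + 1) _ hC0
    have hcell := hcellgen x _ h1 h2l hb.1 hb.2
    have e1 : pvStep gs (x, y, 1) = (PySem.Int.mod (x + 0) (gs.length : Int), PySem.Int.mod (y + 1) ((gs.headD []).length : Int),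
        ((PySem.Dict.get? pvDirsA ((gs.getD (PySem.Int.mod (x + 0) (gs.length : Int)).toNat []).getD
          (PySem.Int.mod (y + 1) ((gs.headD []).length : Int)).toNat ' ')).getD []).getD 1 0) := rfl
    rw [add_zero, hmodx] at e1
    have e2 : pvStepB gs (x, y, 1) = (x, PySem.Int.mod (y + 1) ((gs.headD []).length : Int),
        PySem.Int.mod (1 + (PySem.Dict.get? pvTurnB ((gs.getD (x).toNat []).getD
          (PySem.Int.mod (y + 1) ((gs.headD []).length : Int)).toNat ' ')).getD 0) 4) := rfl
    rw [e1, e2]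
    simp only [Prod.mk.injEq]
    refine ⟨by trivial, by trivial, ?_⟩
    exact pvTurn_eq _ hcell 1 (by norm_num) (by norm_num)
  · -- d = 2
    have hb := pvMod_bounds (x - 1) _ hR0
    have hcell := hcellgen _ y hb.1 hb.2 h3 h4l
    have e1 : pvStep gs (x, y, 2) = (PySem.Int.mod (x + -1) (gs.length : Int), PySem.Int.mod (y + 0) ((gs.headD []).length : Int),
        ((PySem.Dict.get? pvDirsA ((gs.getD (PySem.Int.mod (x + -1) (gs.length : Int)).toNat []).getD
          (PySem.Int.mod (y + 0) ((gs.headD []).length : Int)).toNat ' ')).getD []).getD 2 0) := rfl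
    rw [add_zero, hmody, show x + (-1 : Int) = x - 1 by ring] at e1
    have e2 : pvStepB gs (x, y, 2) = (PySem.Int.mod (x - 1) (gs.length : Int), y,
        PySem.Int.mod (2 + (PySem.Dict.get? pvTurnB ((gs.getD (PySem.Int.mod (x - 1) (gs.length : Int)).toNat []).getD
          (y).toNat ' ')).getD 0) 4) := rfl
    rw [e1, e2]
    simp only [Prod.mk.injEq]
    refine ⟨by trivial, by trivial, ?_⟩
    exact pvTurn_eq _ hcell 2 (by norm_num) (by norm_num)
  · -- d = 3
    have hb := pvMod_bounds (y - 1) _ hC0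
    have hcell := hcellgen x _ h1 h2l hb.1 hb.2
    have e1 : pvStep gs (x, y, 3) = (PySem.Int.mod (x + 0) (gs.length : Int), PySem.Int.mod (y + -1) ((gs.headD []).length : Int),
        ((PySem.Dict.get? pvDirsA ((gs.getD (PySem.Int.mod (x + 0) (gs.length : Int)).toNat []).getD
          (PySem.Int.mod (y + -1) ((gs.headD []).length : Int)).toNat ' ')).getD []).getD 3 0) := rfl
    rw [add_zero, hmodx, show y + (-1 : Int) = y - 1 by ring] at e1
    have e2 : pvStepB gs (x, y, 3) = (x, PySem.Int.mod (y - 1) ((gs.headD []).length : Int),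
        PySem.Int.mod (3 + (PySem.Dict.get? pvTurnB ((gs.getD (x).toNat []).getD
          (PySem.Int.mod (y - 1) ((gs.headD []).length : Int)).toNat ' ')).getD 0) 4) := rfl
    rw [e1, e2]
    simp only [Prod.mk.injEq]
    refine ⟨by trivial, by trivial, ?_⟩
    exact pvTurn_eq _ hcell 3 (by norm_num) (by norm_num)

-- ----- the triple scan order -----

def pvTriples (R C : Nat) : List (Int × Int × Int) :=
  (List.range R).flatMap (fun (x : Nat) => (List.range C).flatMap (fun (y : Nat) =>
    (List.range 4).map (fun (d : Nat) => ((x : Int), (y : Int), (d : Int)))))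

theorem pv_range_mul (a b : Nat) :
    List.range (a * b) = (List.range a).flatMap (fun i => (List.range b).map (fun j => i * b + j)) := by
  induction a with
  | zero => simp
  | succ n ih =>
    rw [Nat.succ_mul, List.range_add, ih, List.range_succ, List.flatMap_append]
    simp

theorem pvEnc_cast (C x y d : Nat) :
    (pvEnc C ((x : Int), (y : Int), (d : Int))).toNat = x * (C * 4) + (y * 4 + d) := by
  have h : pvEnc C ((x : Int), (y : Int), (d : Int)) = ((x * (C * 4) + (y * 4 + d) : Nat) : Int) := by
    simp only [pvEnc]; push_cast; ring
  rw [h, Int.toNat_natCast]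

theorem pvTriples_valid {R C : Nat} {s : Int × Int × Int} (hs : s ∈ pvTriples R C) :
    pvValid R C s := by
  unfold pvTriples at hs
  rw [List.mem_flatMap] at hs
  obtain ⟨x, hx, hs⟩ := hs
  rw [List.mem_flatMap] at hs
  obtain ⟨y, hy, hs⟩ := hs
  rw [List.mem_map] at hs
  obtain ⟨d, hd, rfl⟩ := hs
  rw [List.mem_range] at hx hy hd
  exact ⟨Int.natCast_nonneg x, by show (x : Int) < (R : Int); exact_mod_cast hx,
    Int.natCast_nonneg y, by show (y : Int) < (C : Int); exact_mod_cast hy,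
    Int.natCast_nonneg d, by show (d : Int) < (4 : Int); exact_mod_cast hd⟩

theorem pvRange_eq_triples_map (R C : Nat) :
    List.range (R * C * 4) = (pvTriples R C).map (fun s => (pvEnc C s).toNat) := by
  have hmid : ∀ x : Nat,
      (List.range (C * 4)).map (fun j => x * (C * 4) + j)
        = ((List.range C).flatMap (fun (y : Nat) => (List.range 4).map
            (fun (d : Nat) => ((x : Int), (y : Int), (d : Int))))).map (fun s => (pvEnc C s).toNat) := by
    intro x
    rw [pv_range_mul C 4, List.map_flatMap, List.map_flatMap]
    refine List.flatMap_congr ?_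
    intro y _
    rw [List.map_map, List.map_map]
    refine List.map_congr_left ?_
    intro d _
    simp only [Function.comp_apply]
    rw [pvEnc_cast]
  have hmul : R * C * 4 = R * (C * 4) := by ring
  rw [hmul, pv_range_mul R (C * 4)]
  unfold pvTriples
  rw [List.map_flatMap]
  refine List.flatMap_congr ?_
  intro x _
  exact hmid x

theorem pvEnc_lt_of_lex {R C : Nat} {a b : Int × Int × Int} (ha : pvValid R C a)
    (hb : pvValid R C b) (h : pvLexGt b a = true) : pvEnc C a < pvEnc C b := by
  obtain ⟨a1, a2, a3⟩ := a
  obtain ⟨b1, b2, b3⟩ := b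
  obtain ⟨p1, p2, p3, p4, p5, p6⟩ := ha
  obtain ⟨q1, q2, q3, q4, q5, q6⟩ := hb
  simp only at p1 p2 p3 p4 p5 p6 q1 q2 q3 q4 q5 q6
  simp only [pvLexGt, Bool.or_eq_true, Bool.and_eq_true, decide_eq_true_eq] at h
  simp only [pvEnc]
  rcases h with h1 | ⟨heq, h2⟩
  · have h4 : (a1 + 1) * (C : Int) ≤ b1 * (C : Int) :=
      mul_le_mul_of_nonneg_right (by omega) (by positivity)
    have h5 : a1 * (C : Int) + (C : Int) = (a1 + 1) * (C : Int) := by ring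
    set u := a1 * (C : Int)
    set t := b1 * (C : Int)
    omega
  · rw [heq]
    set t := a1 * (C : Int)
    rcases h2 with h2 | ⟨h2, h3⟩ <;> omega

theorem pvLex_of_enc_lt {R C : Nat} {a b : Int × Int × Int} (ha : pvValid R C a)
    (hb : pvValid R C b) (h : pvEnc C a < pvEnc C b) : pvLexGt b a = true := by
  rcases pvLexGt_trichotomy b a with hgt | heq | hlt
  · exact hgt
  · rw [heq] at h; omega
  · have := pvEnc_lt_of_lex hb ha hlt; omega

theorem pvTriples_pairwise (R C : Nat) :
    (pvTriples R C).Pairwise (fun a b => pvLexGt b a = true) := by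
  have h1 : (List.range (R * C * 4)).Pairwise (· < ·) := List.pairwise_lt_range
  rw [pvRange_eq_triples_map, List.pairwise_map] at h1
  refine h1.imp_of_mem ?_
  intro a b hma hmb hlt
  have ha := pvTriples_valid hma
  have hb := pvTriples_valid hmb
  refine pvLex_of_enc_lt ha hb ?_
  have h0a := pvEnc_nonneg (R := R) ha
  have h0b := pvEnc_nonneg (R := R) hb
  omega

theorem pvTriples_complete {R C : Nat} {t : Int × Int × Int} (ht : pvValid R C t) :
    t ∈ pvTriples R C := by
  obtain ⟨x, y, d⟩ := t
  obtain ⟨h1, h2, h3, h4, h5, h6⟩ := ht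
  simp only at h1 h2 h3 h4 h5 h6
  unfold pvTriples
  rw [List.mem_flatMap]
  refine ⟨x.toNat, by rw [List.mem_range]; omega, ?_⟩
  rw [List.mem_flatMap]
  refine ⟨y.toNat, by rw [List.mem_range]; omega, ?_⟩
  rw [List.mem_map]
  refine ⟨d.toNat, by rw [List.mem_range]; omega, ?_⟩
  rw [Int.toNat_of_nonneg h1, Int.toNat_of_nonneg h3, Int.toNat_of_nonneg h5]

-- ----- visits structure -----

def pvVShape (v : List (List (List Bool))) (R C : Nat) : Prop :=
  v.length = R ∧ ∀ row ∈ v, row.length = C ∧ ∀ cell ∈ row, cell.length = 4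

theorem pv_getD_set {α : Type} (l : List α) (i j : Nat) (a dflt : α) (hi : i < l.length) :
    (l.set i a).getD j dflt = if j = i then a else l.getD j dflt := by
  by_cases hj : j = i
  · subst hj; simp [List.getD, hi]
  · simp [List.getD, hj, Ne.symm hj]

theorem pvVSet_shape {R C : Nat} {v : List (List (List Bool))} (hsh : pvVShape v R C)
    {s : Int × Int × Int} (hs : pvValid R C s) :
    pvVShape (pvVSet v s.1 s.2.1 s.2.2) R C := by
  obtain ⟨hvlen, hrows⟩ := hsh
  obtain ⟨x, y, d⟩ := s
  obtain ⟨h1, h2, h3, h4, h5, h6⟩ := hs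
  simp only at h1 h2 h3 h4 h5 h6
  have hxl : x.toNat < v.length := by rw [hvlen]; omega
  have hrowmem : v.getD x.toNat [] ∈ v := by
    rw [List.getD_eq_getElem _ _ hxl]; exact List.getElem_mem hxl
  obtain ⟨hrl, hcells⟩ := hrows _ hrowmem
  have hyl : y.toNat < (v.getD x.toNat []).length := by rw [hrl]; omega
  have hcellmem : (v.getD x.toNat []).getD y.toNat [] ∈ v.getD x.toNat [] := by
    rw [List.getD_eq_getElem _ _ hyl]; exact List.getElem_mem hyl
  have hcl := hcells _ hcellmem
  refine ⟨by simpa [pvVSet] using hvlen, ?_⟩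
  intro row hrow
  rcases List.mem_or_eq_of_mem_set hrow with hmem | rfl
  · exact hrows _ hmem
  · refine ⟨by simpa using hrl, ?_⟩
    intro cell hcell
    rcases List.mem_or_eq_of_mem_set hcell with hm | rfl
    · exact hcells _ hm
    · simpa using hcl

theorem pvVGet_vSet {R C : Nat} {v : List (List (List Bool))} (hsh : pvVShape v R C)
    {s u : Int × Int × Int} (hs : pvValid R C s) (hu : pvValid R C u) :
    pvVGet (pvVSet v s.1 s.2.1 s.2.2) u.1 u.2.1 u.2.2
      = if u = s then true else pvVGet v u.1 u.2.1 u.2.2 := by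
  obtain ⟨hvlen, hrows⟩ := hsh
  obtain ⟨x, y, d⟩ := s
  obtain ⟨h1, h2, h3, h4, h5, h6⟩ := hs
  simp only at h1 h2 h3 h4 h5 h6
  obtain ⟨x', y', d'⟩ := u
  obtain ⟨a1, a2, a3, a4, a5, a6⟩ := hu
  simp only at a1 a2 a3 a4 a5 a6
  have hxl : x.toNat < v.length := by rw [hvlen]; omega
  have hrowmem : v.getD x.toNat [] ∈ v := by
    rw [List.getD_eq_getElem _ _ hxl]; exact List.getElem_mem hxl
  obtain ⟨hrl, hcells⟩ := hrows _ hrowmem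
  have hyl : y.toNat < (v.getD x.toNat []).length := by rw [hrl]; omega
  have hcellmem : (v.getD x.toNat []).getD y.toNat [] ∈ v.getD x.toNat [] := by
    rw [List.getD_eq_getElem _ _ hyl]; exact List.getElem_mem hyl
  have hdl : d.toNat < ((v.getD x.toNat []).getD y.toNat []).length := by
    rw [hcells _ hcellmem]; omega
  simp only [pvVGet, pvVSet]
  rw [pv_getD_set _ _ _ _ _ hxl]
  by_cases hss : ((x', y', d') : Int × Int × Int) = (x, y, d)
  · obtain ⟨e1, e2, e3⟩ : x' = x ∧ y' = y ∧ d' = d := by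
      simpa [Prod.mk.injEq] using hss
    subst e1; subst e2; subst e3
    rw [if_pos rfl, if_pos rfl, pv_getD_set _ _ _ _ _ hyl, if_pos rfl,
      pv_getD_set _ _ _ _ _ hdl, if_pos rfl]
  · rw [if_neg hss]
    by_cases hxx : x' = x
    · subst hxx
      rw [if_pos (by rfl), pv_getD_set _ _ _ _ _ hyl]
      by_cases hyy : y' = y
      · subst hyy
        rw [if_pos rfl, pv_getD_set _ _ _ _ _ hdl]
        have hdd : d'.toNat ≠ d.toNat := by
          intro hcon
          exact hss (by simp only [Prod.mk.injEq]; refine ⟨trivial, trivial, by omega⟩)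
        rw [if_neg hdd]
      · have hyy2 : y'.toNat ≠ y.toNat := by
          intro hcon; exact hyy (by omega)
        rw [if_neg hyy2]
    · have hxx2 : x'.toNat ≠ x.toNat := by
        intro hcon; exact hxx (by omega)
      rw [if_neg hxx2]

-- ----- A's loop returns the least period and marks the orbit -----

theorem pvLoopA {gs : List (List Char)} {R C : Nat} (h : pvGridOK gs R C)
    {s : Int × Int × Int} (hs : pvValid R C s) {p : Nat}
    (hpret : (pvStep gs)^[p] s = s) (hpmin : ∀ k, 1 ≤ k → k < p → (pvStep gs)^[k] s ≠ s) :
    ∀ fuel t v, t < p → p - t ≤ fuel → pvVShape v R C →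
      ∃ v', pvFindLoop gs s.1 s.2.1 s.2.2 fuel ((pvStep gs)^[t] s).1 ((pvStep gs)^[t] s).2.1
              ((pvStep gs)^[t] s).2.2 (t : Int) v = ((p : Int), v')
        ∧ pvVShape v' R C
        ∧ ∀ u, pvValid R C u → (pvVGet v' u.1 u.2.1 u.2.2 = true ↔
            (pvVGet v u.1 u.2.1 u.2.2 = true ∨ ∃ k, t + 1 ≤ k ∧ k < p ∧ (pvStep gs)^[k] s = u)) := by
  intro fuel
  induction fuel with
  | zero => intro t v ht hf; omega
  | succ fuel ih =>
    intro t v ht hf hsh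
    have hval : pvValid R C ((pvStep gs)^[t] s) := pvIter_valid h hs t
    have hnext : pvStep gs ((pvStep gs)^[t] s) = (pvStep gs)^[t + 1] s :=
      (Function.iterate_succ_apply' _ _ _).symm
    have hvaln : pvValid R C ((pvStep gs)^[t + 1] s) := pvIter_valid h hs (t + 1)
    have hunfA : pvFindLoop gs s.1 s.2.1 s.2.2 (fuel + 1) ((pvStep gs)^[t] s).1
          ((pvStep gs)^[t] s).2.1 ((pvStep gs)^[t] s).2.2 (t : Int) v
        = if (pvStep gs ((pvStep gs)^[t] s)).1 = s.1 ∧ (pvStep gs ((pvStep gs)^[t] s)).2.1 = s.2.1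
            ∧ (pvStep gs ((pvStep gs)^[t] s)).2.2 = s.2.2
          then ((t : Int) + 1, v)
          else pvFindLoop gs s.1 s.2.1 s.2.2 fuel (pvStep gs ((pvStep gs)^[t] s)).1
                 (pvStep gs ((pvStep gs)^[t] s)).2.1 (pvStep gs ((pvStep gs)^[t] s)).2.2
                 ((t : Int) + 1)
                 (pvVSet v (pvStep gs ((pvStep gs)^[t] s)).1 (pvStep gs ((pvStep gs)^[t] s)).2.1
                   (pvStep gs ((pvStep gs)^[t] s)).2.2) := rfl
    by_cases hbrk : (pvStep gs)^[t + 1] s = s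
    · have hp1 : t + 1 = p := by
        by_contra hne
        exact hpmin (t + 1) (by omega) (by omega) hbrk
      have hcond : (pvStep gs ((pvStep gs)^[t] s)).1 = s.1
          ∧ (pvStep gs ((pvStep gs)^[t] s)).2.1 = s.2.1
          ∧ (pvStep gs ((pvStep gs)^[t] s)).2.2 = s.2.2 := by
        rw [hnext, hbrk]; exact ⟨rfl, rfl, rfl⟩
      refine ⟨v, ?_, hsh, ?_⟩
      · rw [hunfA, if_pos hcond]
        have : (t : Int) + 1 = ((p : Nat) : Int) := by omega
        rw [this]
      · intro u hu
        constructor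
        · exact fun hh => Or.inl hh
        · rintro (hh | ⟨k, hk1, hk2, _⟩)
          · exact hh
          · omega
    · have hcond : ¬((pvStep gs ((pvStep gs)^[t] s)).1 = s.1
          ∧ (pvStep gs ((pvStep gs)^[t] s)).2.1 = s.2.1
          ∧ (pvStep gs ((pvStep gs)^[t] s)).2.2 = s.2.2) := by
        intro hc
        exact hbrk (by rw [← hnext]; exact Prod.ext hc.1 (Prod.ext hc.2.1 hc.2.2))
      have hlt : t + 1 < p := by
        rcases Nat.lt_or_ge (t + 1) p with hlt | hge
        · exact hlt
        · exfalso
          have : t + 1 = p := by omega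
          rw [this, hpret] at hbrk
          exact hbrk rfl
      obtain ⟨v', hveq, hvsh, hvrel⟩ := ih (t + 1)
        (pvVSet v ((pvStep gs)^[t + 1] s).1 ((pvStep gs)^[t + 1] s).2.1 ((pvStep gs)^[t + 1] s).2.2)
        hlt (by omega) (pvVSet_shape hsh hvaln)
      refine ⟨v', ?_, hvsh, ?_⟩
      · rw [hunfA, if_neg hcond]
        rw [show ((t : Int) + 1) = (((t + 1 : Nat)) : Int) by push_cast; ring]
        rw [hnext]
        exact hveq
      · intro u hu
        rw [hvrel u hu, pvVGet_vSet hsh hvaln hu]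
        by_cases hus : u = (pvStep gs)^[t + 1] s
        · rw [if_pos hus]
          constructor
          · intro _; exact Or.inr ⟨t + 1, by omega, hlt, hus.symm⟩
          · intro _; exact Or.inl rfl
        · rw [if_neg hus]
          constructor
          · rintro (hh | ⟨k, hk1, hk2, hk3⟩)
            · exact Or.inl hh
            · exact Or.inr ⟨k, by omega, hk2, hk3⟩
          · rintro (hh | ⟨k, hk1, hk2, hk3⟩)
            · exact Or.inl hh
            · rcases Nat.eq_or_lt_of_le hk1 with rfl | hkk
              · exact absurd hk3.symm hus
              · exact Or.inr ⟨k, by omega, hk2, hk3⟩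

-- ----- B's walk -----

theorem pvWalkGen {gs : List (List Char)} {R C : Nat} (h : pvGridOK gs R C)
    {s : Int × Int × Int} (hs : pvValid R C s) {p : Nat} (hp1 : 1 ≤ p)
    (hpret : (pvStep gs)^[p] s = s) :
    ∀ fuel t, 1 ≤ t → t ≤ p → p + 1 - t ≤ fuel →
      ∃ m, t ≤ m ∧ m ≤ p ∧
        pvWalkAlt gs s fuel ((pvStep gs)^[t] s) (t : Int) = ((m : Int), (pvStep gs)^[m] s)
        ∧ pvLexGt ((pvStep gs)^[m] s) s = false
        ∧ ∀ k, t ≤ k → k < m → pvLexGt ((pvStep gs)^[k] s) s = true := by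
  intro fuel
  induction fuel with
  | zero => intro t ht1 htp hf; omega
  | succ fuel ih =>
    intro t ht1 htp hf
    have hval : pvValid R C ((pvStep gs)^[t] s) := pvIter_valid h hs t
    have hunf : pvWalkAlt gs s (fuel + 1) ((pvStep gs)^[t] s) (t : Int)
        = if pvLexGt ((pvStep gs)^[t] s) s
          then pvWalkAlt gs s fuel (pvStepB gs ((pvStep gs)^[t] s)) ((t : Int) + 1)
          else ((t : Int), (pvStep gs)^[t] s) := rfl
    by_cases hgt : pvLexGt ((pvStep gs)^[t] s) s = true
    · have htp' : t ≠ p := by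
        intro hEq
        rw [hEq, hpret, pvLexGt_irrefl] at hgt
        exact Bool.false_ne_true hgt
      obtain ⟨m, hm1, hm2, hmeq, hmf, hmall⟩ := ih (t + 1) (by omega) (by omega) (by omega)
      refine ⟨m, by omega, hm2, ?_, hmf, ?_⟩
      · rw [hunf, if_pos hgt, pvStepB_eq h hval,
          show pvStep gs ((pvStep gs)^[t] s) = (pvStep gs)^[t + 1] s from
            (Function.iterate_succ_apply' _ _ _).symm]
        rw [show ((t : Int) + 1) = (((t + 1 : Nat)) : Int) by push_cast; ring]
        exact hmeq
      · intro k hk1 hk2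
        rcases Nat.eq_or_lt_of_le hk1 with rfl | hlt
        · exact hgt
        · exact hmall k (by omega) hk2
    · have hf2 : pvLexGt ((pvStep gs)^[t] s) s = false := by
        revert hgt; cases pvLexGt ((pvStep gs)^[t] s) s <;> simp
      refine ⟨t, le_refl t, htp, ?_, hf2, ?_⟩
      · rw [hunf, if_neg hgt]
      · intro k hk1 hk2; omega

-- ----- fold correspondence -----

def pvBodyA (gs : List (List Char)) (acc : List Int × List (List (List Bool)))
    (s : Int × Int × Int) : List Int × List (List (List Bool)) :=
  let r := pvFindCycle gs s.2.2 s.1 s.2.1 acc.2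
  (if r.1 ≠ 0 then acc.1 ++ [r.1] else acc.1, r.2)

def pvBodyB (gs : List (List Char)) (acc : List Int) (s : Int × Int × Int) : List Int :=
  let r := pvWalkAlt gs s (gs.length * (gs.headD []).length * 4 + 1) (pvStepB gs s) 1
  if r.2 = s then acc ++ [r.1] else acc

def pvInv (gs : List (List Char)) (R C : Nat) (P : List (Int × Int × Int))
    (v : List (List (List Bool))) : Prop :=
  pvVShape v R C ∧ ∀ u, pvValid R C u →
    (pvVGet v u.1 u.2.1 u.2.2 = true ↔ ∃ w ∈ P, ∃ k, (pvStep gs)^[k] w = u)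

theorem pvFoldAB {gs : List (List Char)} {R C : Nat} (h : pvGridOK gs R C) :
    ∀ (l P : List (Int × Int × Int)) (v : List (List (List Bool))) (paths : List Int),
      pvTriples R C = P ++ l → pvInv gs R C P v →
      (l.foldl (pvBodyA gs) (paths, v)).1 = l.foldl (pvBodyB gs) paths := by
  intro l
  induction l with
  | nil => intro P v paths _ _; rfl
  | cons s l ih =>
    intro P v paths heq hinv
    obtain ⟨hsh, hget⟩ := hinv
    have hpw := pvTriples_pairwise R C
    rw [heq] at hpw
    have hpwA := List.pairwise_append.mp hpw
    have hs : pvValid R C s := pvTriples_valid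
      (by rw [heq]; exact List.mem_append_right _ List.mem_cons_self)
    have hPval : ∀ w ∈ P, pvValid R C w := fun w hw =>
      pvTriples_valid (by rw [heq]; exact List.mem_append_left _ hw)
    have hPlt : ∀ w ∈ P, pvLexGt s w = true := fun w hw =>
      hpwA.2.2 w hw s List.mem_cons_self
    have hPcomp : ∀ t', pvValid R C t' → pvLexGt s t' = true → t' ∈ P := by
      intro t' hval hlt
      have hmem : t' ∈ pvTriples R C := pvTriples_complete hval
      rw [heq] at hmem
      rcases List.mem_append.mp hmem with hin | hin
      · exact hin
      · rcases List.mem_cons.mp hin with rfl | hin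
        · rw [pvLexGt_irrefl] at hlt; exact absurd hlt Bool.false_ne_true
        · have hgt := (List.pairwise_cons.mp hpwA.2.1).1 t' hin
          rw [pvLexGt_asym hgt] at hlt
          exact absurd hlt Bool.false_ne_true
    obtain ⟨p, hp1, hpN, hpret, hpmin⟩ := pvPeriod_exists h hs
    have hfuel : gs.length * (gs.headD []).length * 4 + 1 = R * C * 4 + 1 := by
      rw [h.1, h.2.2.2.1]
    have heq' : pvTriples R C = (P ++ [s]) ++ l := by
      rw [List.append_assoc, List.singleton_append]; exact heq
    obtain ⟨m, hm1, hm2, hmeq, hmf, hmall⟩ :=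
      pvWalkGen h hs hp1 hpret (gs.length * (gs.headD []).length * 4 + 1) 1
        (le_refl 1) hp1 (by omega)
    rw [Nat.cast_one, Function.iterate_one] at hmeq
    simp only [List.foldl_cons]
    by_cases hv : pvVGet v s.1 s.2.1 s.2.2 = true
    · -- s already visited: an earlier state of its cycle is in P, so s is not the orbit minimum
      have hA : pvBodyA gs (paths, v) s = (paths, v) := by
        simp [pvBodyA, pvFindCycle, hv]
      obtain ⟨w, hwP, k, hk⟩ := (hget s hs).mp hv
      obtain ⟨m0, hm0⟩ := pvOrb_symm h (hPval w hwP) hk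
      have hm0' : (pvStep gs)^[m0 % p] s = w := by
        rw [← pvIter_period hpret m0]; exact hm0
      have hmne : m0 % p ≠ 0 := by
        intro h0
        rw [h0, Function.iterate_zero_apply] at hm0'
        have := hPlt w hwP
        rw [← hm0', pvLexGt_irrefl] at this
        exact Bool.false_ne_true this
      have hmlt : m0 % p < p := Nat.mod_lt _ (by omega)
      have hjgt : pvLexGt ((pvStep gs)^[m0 % p] s) s = false := by
        rw [hm0']; exact pvLexGt_asym (hPlt w hwP)
      have hmne2 : (pvStep gs)^[m] s ≠ s := by
        intro hEq
        have hmp : m = p := by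
          rcases Nat.eq_or_lt_of_le hm2 with rfl | hl
          · rfl
          · exact absurd hEq (hpmin m (by omega) hl)
        have := hmall (m0 % p) (by omega) (by omega)
        rw [hjgt] at this
        exact Bool.false_ne_true this
      have hB : pvBodyB gs paths s = paths := by
        simp only [pvBodyB]
        rw [pvStepB_eq h hs, hmeq]
        simp [hmne2]
      rw [hA, hB]
      refine ih (P ++ [s]) v paths heq' ⟨hsh, ?_⟩
      intro u hu
      rw [hget u hu]
      constructor
      · rintro ⟨w', hw', k', hk'⟩
        exact ⟨w', List.mem_append_left _ hw', k', hk'⟩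
      · rintro ⟨w', hw', k', hk'⟩
        rcases List.mem_append.mp hw' with hin | hin
        · exact ⟨w', hin, k', hk'⟩
        · rcases List.mem_cons.mp hin with rfl | hin
          · refine ⟨w, hwP, k' + k, ?_⟩
            rw [Function.iterate_add_apply, hk]
            exact hk'
          · exact absurd hin (List.not_mem_nil)
    · -- s unvisited: s is its cycle's lexicographic minimum; both sides append the period
      have hmin : ∀ k, 1 ≤ k → k < p → pvLexGt ((pvStep gs)^[k] s) s = true := by
        intro k hk1 hk2
        have hval := pvIter_valid h hs k
        rcases pvLexGt_trichotomy ((pvStep gs)^[k] s) s with hgt | hEq | hlt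
        · exact hgt
        · exact absurd hEq (hpmin k hk1 hk2)
        · exfalso
          have hinP := hPcomp _ hval hlt
          obtain ⟨m', hm'⟩ := pvOrb_symm h hs (k := k) rfl
          exact hv ((hget s hs).mpr ⟨_, hinP, m', hm'⟩)
      have hmp : m = p := by
        rcases Nat.eq_or_lt_of_le hm2 with hE | hl
        · exact hE
        · have := hmin m (by omega) hl
          rw [hmf] at this
          exact absurd this Bool.false_ne_true
      rw [hmp] at hmeq
      have hB : pvBodyB gs paths s = paths ++ [((p : Nat) : Int)] := by
        simp only [pvBodyB]
        rw [pvStepB_eq h hs, hmeq, hpret]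
        simp
      have hvf : pvVGet v s.1 s.2.1 s.2.2 = false := by
        revert hv; cases pvVGet v s.1 s.2.1 s.2.2 <;> simp
      obtain ⟨v', hveq, hvsh, hvrel⟩ := pvLoopA h hs hpret hpmin
        (gs.length * (gs.headD []).length * 4 + 1) 0
        (pvVSet v s.1 s.2.1 s.2.2) (by omega) (by omega) (pvVSet_shape hsh hs)
      rw [Function.iterate_zero_apply, Nat.cast_zero] at hveq
      have hm0 : ((p : Nat) : Int) ≠ 0 := by omega
      have hA : pvBodyA gs (paths, v) s = (paths ++ [((p : Nat) : Int)], v') := by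
        simp only [pvBodyA, pvFindCycle, hvf]
        rw [hveq]
        simp
        omega
      rw [hA, hB]
      refine ih (P ++ [s]) v' (paths ++ [((p : Nat) : Int)]) heq' ⟨hvsh, ?_⟩
      intro u hu
      rw [hvrel u hu, pvVGet_vSet hsh hs hu]
      constructor
      · rintro (hif | ⟨k, hk1, hk2, hk3⟩)
        · by_cases hus : u = s
          · exact ⟨s, by simp, 0, by rw [Function.iterate_zero_apply]; exact hus.symm⟩
          · rw [if_neg hus] at hif
            obtain ⟨w', hw', k', hk'⟩ := (hget u hu).mp hif
            exact ⟨w', List.mem_append_left _ hw', k', hk'⟩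
        · exact ⟨s, by simp, k, hk3⟩
      · rintro ⟨w', hw', k', hk'⟩
        rcases List.mem_append.mp hw' with hin | hin
        · have hold := (hget u hu).mpr ⟨w', hin, k', hk'⟩
          left
          by_cases hus : u = s
          · rw [if_pos hus]
          · rw [if_neg hus]; exact hold
        · rcases List.mem_cons.mp hin with hws | hin
          · subst hws
            have hk'' : (pvStep gs)^[k' % p] w' = u := by
              rw [← pvIter_period hpret]; exact hk'
            by_cases h0 : k' % p = 0
            · left
              rw [h0, Function.iterate_zero_apply] at hk''
              rw [if_pos hk''.symm]
            · right
              exact ⟨k' % p, by omega, Nat.mod_lt _ (by omega), hk''⟩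
          · exact absurd hin List.not_mem_nil

-- ----- reindexing the nested loops -----

theorem pvSolutionA_eq_fold (grids : List String) {R C : Nat}
    (h : pvGridOK (grids.map String.toList) R C) :
    solution grids = PySem.List.sorted
      ((pvTriples R C).foldl (pvBodyA (grids.map String.toList))
        (([] : List Int), (grids.map String.toList).map
          (fun row => row.map (fun _ => [false, false, false, false])))).1
      (fun x => x) false := by
  obtain ⟨hlen, hR, hC, hhead, hrows⟩ := h
  unfold solution
  dsimp only
  rw [hlen]
  refine congrArg (fun l => PySem.List.sorted l (fun x => x) false) (congrArg Prod.fst ?_)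
  rw [pvTriples, List.foldl_flatMap]
  refine (PySem.List.foldl_congr_mem _ _ _ _ ?_).symm
  intro acc x hx
  rw [List.mem_range] at hx
  rw [List.foldl_flatMap]
  have hrl : ((grids.map String.toList).getD x []).length = C := by
    have hxl : x < (grids.map String.toList).length := by rw [hlen]; exact hx
    have : (grids.map String.toList).getD x [] ∈ grids.map String.toList := by
      rw [List.getD_eq_getElem _ _ hxl]; exact List.getElem_mem hxl
    exact (hrows _ this).1
  rw [hrl]
  refine PySem.List.foldl_congr_mem _ _ _ _ ?_
  intro acc2 y hy
  rw [List.foldl_map]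
  rfl

theorem pvSolutionB_eq_fold (grids : List String) {R C : Nat}
    (h : pvGridOK (grids.map String.toList) R C) :
    solution_alt grids = PySem.List.sorted
      ((pvTriples R C).foldl (pvBodyB (grids.map String.toList)) ([] : List Int))
      (fun x => x) false := by
  obtain ⟨hlen, hR, hC, hhead, hrows⟩ := h
  unfold solution_alt
  dsimp only
  rw [← hlen]
  refine congrArg (fun l => PySem.List.sorted l (fun x => x) false) ?_
  rw [pvTriples, List.foldl_flatMap]
  refine (PySem.List.foldl_congr_mem _ _ _ _ ?_).symm
  intro acc x hx
  rw [List.mem_range] at hx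
  rw [List.foldl_flatMap]
  have hrl : ((grids.map String.toList).getD x []).length = C := by
    have hxl : x < (grids.map String.toList).length := hx
    have : (grids.map String.toList).getD x [] ∈ grids.map String.toList := by
      rw [List.getD_eq_getElem _ _ hxl]; exact List.getElem_mem hxl
    exact (hrows _ this).1
  rw [hrl]
  refine PySem.List.foldl_congr_mem _ _ _ _ ?_
  intro acc2 y hy
  rw [List.foldl_map]
  rfl

theorem pvInv_init {gs : List (List Char)} {R C : Nat} (h : pvGridOK gs R C) :
    pvInv gs R C []
      (gs.map (fun row => row.map (fun _ => [false, false, false, false]))) := by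
  obtain ⟨hlen, hR, hC, hhead, hrows⟩ := h
  have hcell4 : ∀ k : Nat, ([false, false, false, false] : List Bool).getD k false = false := by
    intro k
    rcases k with _ | _ | _ | _ | k <;> rfl
  refine ⟨⟨by simpa using hlen, ?_⟩, ?_⟩
  · intro row hrow
    rw [List.mem_map] at hrow
    obtain ⟨r0, hr0, rfl⟩ := hrow
    refine ⟨by simpa using (hrows _ hr0).1, ?_⟩
    intro cell hcell
    rw [List.mem_map] at hcell
    obtain ⟨c0, hc0, rfl⟩ := hcell
    rfl
  · intro u hu
    obtain ⟨x, y, d⟩ := u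
    obtain ⟨a1, a2, a3, a4, a5, a6⟩ := hu
    simp only at a1 a2 a3 a4 a5 a6
    have hxl : x.toNat < gs.length := by rw [hlen]; omega
    have hv : (gs.map (fun row => row.map (fun _ => [false, false, false, false]))).getD x.toNat []
        = (gs.getD x.toNat []).map (fun _ => [false, false, false, false]) := by
      rw [List.getD_eq_getElem _ _ (by simpa using hxl), List.getElem_map,
        List.getD_eq_getElem _ _ hxl]
    have hrowmem : gs.getD x.toNat [] ∈ gs := by
      rw [List.getD_eq_getElem _ _ hxl]; exact List.getElem_mem hxl
    have hyl : y.toNat < (gs.getD x.toNat []).length := by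
      rw [(hrows _ hrowmem).1]; omega
    have hc : ((gs.getD x.toNat []).map (fun _ => [false, false, false, false])).getD y.toNat []
        = [false, false, false, false] := by
      rw [List.getD_eq_getElem _ _ (by simpa using hyl), List.getElem_map]
    simp only [pvVGet, hv, hc, hcell4]
    simp

theorem pv_foldl_id {α β : Type} (l : List α) (init : β) :
    l.foldl (fun acc _ => acc) init = init := by
  induction l generalizing init with
  | nil => rfl
  | cons x l ih => simpa using ih init

-- a grid whose rows all have length zero: neither side's loops ever run
theorem pvAllEmpty (grids : List String)
    (h : (grids.all (fun s => s.toList.length == 0)) = true) :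
    solution grids = solution_alt grids := by
  rw [List.all_eq_true] at h
  have hrow0 : ∀ i : Nat, i < (grids.map String.toList).length →
      ((grids.map String.toList).getD i []).length = 0 := by
    intro i hi
    have hrow : (grids.map String.toList).getD i [] ∈ grids.map String.toList := by
      rw [List.getD_eq_getElem _ _ hi]; exact List.getElem_mem hi
    rw [List.mem_map] at hrow
    obtain ⟨st, hst, hrow⟩ := hrow
    rw [← hrow]
    simpa using h st hst
  have hA : solution grids = [] := by
    unfold solution
    dsimp only
    have hfold : (List.range (grids.map String.toList).length).foldl
        (fun acc (i : Nat) =>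
          (List.range (((grids.map String.toList).getD i []).length)).foldl
            (fun acc (j : Nat) =>
              (List.range 4).foldl (fun (acc : List Int × List (List (List Bool))) (d : Nat) =>
                let r := pvFindCycle (grids.map String.toList) (d : Int) (i : Int) (j : Int) acc.2
                (if r.1 ≠ 0 then acc.1 ++ [r.1] else acc.1, r.2)) acc) acc)
        (([] : List Int), (grids.map String.toList).map
          (fun row => row.map (fun _ => [false, false, false, false])))
        = (([] : List Int), (grids.map String.toList).map
          (fun row => row.map (fun _ => [false, false, false, false]))) := by
      rw [PySem.List.foldl_congr_mem _ _ (fun acc _ => acc) _ ?_, pv_foldl_id]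
      intro acc i hi
      rw [List.mem_range] at hi
      rw [hrow0 i hi]
      rfl
    rw [hfold]
    rfl
  have hB : solution_alt grids = [] := by
    unfold solution_alt
    dsimp only
    have hfold : (List.range (grids.map String.toList).length).foldl
        (fun acc (x : Nat) =>
          (List.range (((grids.map String.toList).getD x []).length)).foldl
            (fun acc (y : Nat) =>
              (List.range 4).foldl (fun (acc : List Int) (d : Nat) =>
                let s := ((x : Int), (y : Int), (d : Int))
                let r := pvWalkAlt (grids.map String.toList) s
                  ((grids.map String.toList).length * ((grids.map String.toList).headD []).length * 4 + 1)
                  (pvStepB (grids.map String.toList) s) 1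
                if r.2 = s then acc ++ [r.1] else acc) acc) acc)
        ([] : List Int) = ([] : List Int) := by
      rw [PySem.List.foldl_congr_mem _ _ (fun acc _ => acc) _ ?_, pv_foldl_id]
      intro acc x hx
      rw [List.mem_range] at hx
      rw [hrow0 x hx]
      rfl
    rw [hfold]
    rfl
  rw [hA, hB]

-- ===== VERDICT (by name: the statement is the Claim_ definition above) =====
theorem solution_spec : Claim_equal_solution := by
  intro grids _ hpre
  unfold Spec_solution
  rcases hpre with hempty | ⟨hC0g, hpre2⟩
  · exact pvAllEmpty grids hempty
  · rcases grids with _ | ⟨g0, gr⟩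
    · rfl
    · have hC0 : 0 < (((g0 :: gr).headD "").toList).length := hC0g
      have hOK : pvGridOK ((g0 :: gr).map String.toList)
          (((g0 :: gr).map String.toList).length)
          ((((g0 :: gr).map String.toList).headD []).length) := by
        refine ⟨rfl, by simp, ?_, rfl, ?_⟩
        · simpa using hC0
        · intro row hrow
          rw [List.mem_map] at hrow
          obtain ⟨st, hst, rfl⟩ := hrow
          have h1 := hpre2
          rw [List.all_eq_true] at h1
          have h2 := h1 st hst
          simp only [Bool.and_eq_true, Bool.or_eq_true, beq_iff_eq, List.all_eq_true] at h2
          obtain ⟨hlen', hchars⟩ := h2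
          exact ⟨by simpa using hlen', fun c hc => (hchars c hc).imp_right id |>.elim (fun h => h.elim Or.inl (fun h2 => Or.inr (Or.inl h2))) (fun h => Or.inr (Or.inr h))⟩
      rw [pvSolutionA_eq_fold _ hOK, pvSolutionB_eq_fold _ hOK]
      refine congrArg (fun l => PySem.List.sorted l (fun x => x) false) ?_
      exact pvFoldAB hOK (pvTriples _ _) [] _ [] rfl (pvInv_init hOK)
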